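-- pv_equiv track=rewrite | github.com/xnsl291/Algorithms-study | BaekJoon/py/Bronze/2231_분해합/solution.py | solution
-- ===== SOURCE A (Python) =====
-- def solution(n):
--
--     for i in range(n):
--         result = i
--         for length in range(len(str(i))):
--             result+=int(str(i)[length])
--         if result == n:
--             return i
--     return 0
-- ===== SOURCE B (Python) =====
-- def solution(n):
--     # Only i >= n - 9*len(str(n)) can satisfy i + digitsum(i) == n, so scan
--     # just that window; digit sum computed arithmetically instead of via str.
--     def ds(m):
--         s = 0
--         while m:
--             s += m % 10
--             m //= 10
--         return s
--     start = max(0, n - 9 * len(str(n)))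
--     for i in range(start, n):
--         if i + ds(i) == n:
--             return i
--     return 0
-- ===== Notes on version B (the rewrite author's own statement) =====
-- stated objective: faster
-- what changed: B scans only the feasible candidate window [max(0, n - 9*len(str(n))), n) instead of all of range(n), and computes each digit sum arithmetically (% and //) instead of indexing into str(i).
import Mathlib
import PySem

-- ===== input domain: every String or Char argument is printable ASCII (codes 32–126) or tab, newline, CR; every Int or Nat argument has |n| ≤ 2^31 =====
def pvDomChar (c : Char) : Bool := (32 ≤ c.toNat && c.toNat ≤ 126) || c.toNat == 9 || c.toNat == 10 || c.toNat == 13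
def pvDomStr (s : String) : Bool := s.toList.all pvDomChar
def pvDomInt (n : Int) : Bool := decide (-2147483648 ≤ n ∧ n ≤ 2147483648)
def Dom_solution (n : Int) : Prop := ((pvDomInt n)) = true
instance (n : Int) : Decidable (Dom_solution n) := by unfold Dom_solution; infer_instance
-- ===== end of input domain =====

-- B scans only the candidate window [max(0, n - 9*len(str(n))), n) and sums digits
-- arithmetically, instead of A's scan of the whole range(n) with string digit sums.

-- ===== PORT A =====
-- `result = i; for length in range(len(str(i))): result += int(str(i)[length])`
-- (`int(...)` can never raise here — every indexed char of str(i) for i ≥ 0 is a digit —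
--  so the `.getD 0` branch is unreachable)
def solutionResult (i : Int) : Int :=
  (PySem.List.pyRange 0 (PySem.Str.len (PySem.Int.toStr i))).foldl
    (fun result length =>
      result + ((PySem.Str.pyGet? (PySem.Int.toStr i) length).bind
                  (fun c => PySem.Int.ofChars? [c])).getD 0) i

-- `for i in range(n): ... if result == n: return i` / `return 0`
def solutionGo (n : Int) : List Int → Int
  | [] => 0
  | i :: rest => if solutionResult i = n then i else solutionGo n rest

def solution (n : Int) : Int :=
  solutionGo n (PySem.List.pyRange 0 n)

-- ===== PORT B =====
-- `while m: s += m % 10; m //= 10` — the guard `m ≤ 0` (instead of `m ≠ 0`) only makes the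
-- loop total; B calls it with m ≥ 0 exclusively (i ranges over [start, n) with start ≥ 0)
def altDs (s m : Int) : Int :=
  if m ≤ 0 then s
  else altDs (s + PySem.Int.mod m 10) (PySem.Int.floordiv m 10)
termination_by m.toNat
decreasing_by
  rename_i h
  rw [PySem.Int.floordiv_eq_ediv_of_pos (by omega : (0:Int) < 10)]
  omega

-- `for i in range(start, n): if i + ds(i) == n: return i` / `return 0`
def altGo (n : Int) : List Int → Int
  | [] => 0
  | i :: rest => if i + altDs 0 i = n then i else altGo n rest

def solution_alt (n : Int) : Int :=
  let start := max 0 (n - 9 * PySem.Str.len (PySem.Int.toStr n))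
  altGo n (PySem.List.pyRange start n)

-- ===== PRECONDITION & SPEC =====
def Spec_solution (n : Int) (out : Int) : Prop := out = solution_alt n
instance (n : Int) (out : Int) : Decidable (Spec_solution n out) := by unfold Spec_solution; infer_instance

-- ===== CLAIM (what is proved, stated in full; the proofs are below) =====
def Claim_equal_solution : Prop := ∀ (n : Int), Dom_solution n → Spec_solution n (solution n)

-- ===== LEMMAS AND PROOFS =====

-- str(m) for m : Nat, as core's Nat.toDigitsCore produces it, in recursive form
def dig (m : Nat) : List Char :=
  if m < 10 then [Nat.digitChar m]
  else dig (m / 10) ++ [Nat.digitChar (m % 10)]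
termination_by m
decreasing_by exact Nat.div_lt_self (by omega) (by omega)

-- arithmetic digit sum
def sdig (m : Nat) : Nat :=
  if m = 0 then 0 else m % 10 + sdig (m / 10)
termination_by m
decreasing_by exact Nat.div_lt_self (by omega) (by omega)

theorem toDigitsCore_eq_dig :
    ∀ (f n : Nat) (acc : List Char), n < f →
      Nat.toDigitsCore 10 f n acc = dig n ++ acc := by
  intro f
  induction f with
  | zero => intro n acc h; omega
  | succ f ih =>
    intro n acc h
    simp only [Nat.toDigitsCore]
    by_cases h10 : n / 10 = 0
    · have hn : n < 10 := by omega
      rw [if_pos h10, dig, if_pos hn, Nat.mod_eq_of_lt hn]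
      simp
    · have hn : 10 ≤ n := by
        by_contra hc
        exact h10 (Nat.div_eq_of_lt (by omega))
      rw [if_neg h10, ih (n / 10) _ (by omega)]
      conv_rhs => rw [dig, if_neg (show ¬ n < 10 by omega)]
      simp

theorem toChars_eq_dig (i : Int) (h : 0 ≤ i) :
    PySem.Int.toChars i = dig i.toNat := by
  rw [PySem.Int.toChars, if_neg (by omega), Nat.toDigits,
      toDigitsCore_eq_dig _ _ _ (Nat.lt_succ_self _)]
  simp

theorem ofChars_digitChar : ∀ d : Nat, d < 10 →
    PySem.Int.ofChars? [Nat.digitChar d] = some (d : Int) := by decide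

theorem dig_ne_nil (m : Nat) : dig m ≠ [] := by
  rw [dig]; split <;> simp

theorem dig_eq (m : Nat) :
    dig m = if m < 10 then [Nat.digitChar m] else dig (m / 10) ++ [Nat.digitChar (m % 10)] := by
  rw [dig]

theorem sdig_of_lt10 {m : Nat} (h : m < 10) : sdig m = m := by
  rw [sdig]
  split
  · omega
  · rw [Nat.div_eq_of_lt h, sdig]
    simp [Nat.mod_eq_of_lt h]

theorem dig_sum (m : Nat) :
    ((dig m).map (fun c => (PySem.Int.ofChars? [c]).getD 0)).sum = (sdig m : Int) := by
  induction m using dig.induct with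
  | case1 m hm =>
    rw [dig, if_pos hm, sdig_of_lt10 hm]
    simp [ofChars_digitChar m hm]
  | case2 m hm ih =>
    rw [dig, if_neg hm]
    have h10 : m % 10 < 10 := Nat.mod_lt _ (by omega)
    rw [sdig, if_neg (by omega)]
    simp [ofChars_digitChar _ h10, ih]
    omega

theorem sdig_le (m : Nat) : sdig m ≤ 9 * (dig m).length := by
  induction m using dig.induct with
  | case1 m hm =>
    rw [dig, if_pos hm, sdig_of_lt10 hm]
    simp only [List.length_singleton]; omega
  | case2 m hm ih =>
    rw [dig, if_neg hm, sdig, if_neg (by omega)]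
    have h10 : m % 10 < 10 := Nat.mod_lt _ (by omega)
    simp only [List.length_append, List.length_singleton]
    omega

theorem dig_len_mono : ∀ k m : Nat, m ≤ k → (dig m).length ≤ (dig k).length := by
  intro k
  induction k using dig.induct with
  | case1 k hk =>
    intro m hm
    rw [dig_eq m, if_pos (show m < 10 by omega), dig_eq k, if_pos hk]
    simp
  | case2 k hk ih =>
    intro m hm
    rw [dig_eq k, if_neg hk]
    by_cases hm10 : m < 10
    · rw [dig_eq m, if_pos hm10]
      have := List.length_pos_of_ne_nil (dig_ne_nil (k / 10))
      simp only [List.length_singleton, List.length_append]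
      omega
    · rw [dig_eq m, if_neg hm10]
      have := ih (m / 10) (Nat.div_le_div_right hm)
      simp only [List.length_append, List.length_singleton]
      omega

theorem map_range_getElem? {α β : Type} (cs : List α) (F : Option α → β) :
    (List.range cs.length).map (fun k => F cs[k]?) = cs.map (fun c => F (some c)) := by
  induction cs with
  | nil => simp
  | cons c rest ih =>
    rw [List.length_cons, List.range_succ_eq_map]
    simp only [List.map_cons, List.map_map, List.getElem?_cons_zero]
    refine congrArg (F (some c) :: ·) ?_
    rw [← ih]
    rfl

theorem foldl_digits (cs : List Char) (r : Int) :
    (PySem.List.pyRange 0 (cs.length : Int)).foldl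
      (fun a l => a + ((PySem.List.pyGet? cs l).bind (fun c => PySem.Int.ofChars? [c])).getD 0) r
    = r + (cs.map (fun c => (PySem.Int.ofChars? [c]).getD 0)).sum := by
  rw [PySem.List.pyRange_zero_natCast, List.foldl_map, PySem.List.foldl_add]
  congr 1
  rw [show (fun k : Nat =>
        ((PySem.List.pyGet? cs (k : Int)).bind (fun c => PySem.Int.ofChars? [c])).getD 0)
      = fun k : Nat => ((cs[k]?.bind (fun c => PySem.Int.ofChars? [c])).getD 0) from
    funext fun k => by rw [PySem.List.pyGet?_natCast]]
  rw [map_range_getElem? cs (fun o => (o.bind (fun c => PySem.Int.ofChars? [c])).getD 0)]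
  simp

theorem solutionResult_eq (i : Int) (h : 0 ≤ i) :
    solutionResult i = i + (sdig i.toNat : Int) := by
  unfold solutionResult
  have hts : (PySem.Int.toStr i).toList = dig i.toNat := by
    rw [PySem.Int.toList_toStr, toChars_eq_dig i h]
  simp only [PySem.Str.len, PySem.Str.pyGet?, PySem.Chars.pyGet?, hts]
  rw [foldl_digits, dig_sum]

theorem altDs_eq : ∀ (s m : Int), 0 ≤ m → altDs s m = s + (sdig m.toNat : Int) := by
  intro s m
  induction s, m using altDs.induct with
  | case1 s m hm =>
    intro h0
    have : m = 0 := by omega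
    rw [altDs, if_pos hm, this]
    simp [sdig]
  | case2 s m hm ih =>
    intro h0
    have hpos : 0 < m := by omega
    rw [altDs, if_neg hm]
    have hf : PySem.Int.floordiv m 10 = m / 10 :=
      PySem.Int.floordiv_eq_ediv_of_pos (by omega)
    have hmod : PySem.Int.mod m 10 = m % 10 :=
      PySem.Int.mod_eq_emod_of_pos (by omega)
    rw [ih (by rw [hf]; omega)]
    rw [hf, hmod]
    have hs : sdig m.toNat = m.toNat % 10 + sdig (m.toNat / 10) := by
      rw [sdig, if_neg (by omega)]
    have h1 : (m / 10).toNat = m.toNat / 10 := by omega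
    have h2 : m % 10 = ((m.toNat % 10 : Nat) : Int) := by omega
    rw [h1, h2, hs]
    push_cast
    ring

theorem solutionGo_append (n : Int) (l1 l2 : List Int)
    (h : ∀ i ∈ l1, solutionResult i ≠ n) :
    solutionGo n (l1 ++ l2) = solutionGo n l2 := by
  induction l1 with
  | nil => simp
  | cons i rest ih =>
    simp only [List.cons_append, solutionGo]
    rw [if_neg (h i (by simp)), ih (fun j hj => h j (by simp [hj]))]

theorem go_agree (n : Int) (l : List Int) (h : ∀ i ∈ l, 0 ≤ i) :
    solutionGo n l = altGo n l := by
  induction l with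
  | nil => rfl
  | cons i rest ih =>
    simp only [solutionGo, altGo]
    rw [solutionResult_eq i (h i (by simp)),
        altDs_eq 0 i (h i (by simp)), zero_add,
        ih (fun j hj => h j (by simp [hj]))]

theorem pyRange_one_nil {a b : Int} (h : b ≤ a) : PySem.List.pyRange a b = [] := by
  simp only [PySem.List.pyRange]
  rw [if_neg (by omega : ¬ (1:Int) = 0), if_pos (by omega : (0:Int) < 1),
      if_neg (by omega : ¬ a < b)]
  simp

theorem len_toStr_pos (n : Int) : 1 ≤ PySem.Str.len (PySem.Int.toStr n) := by
  simp only [PySem.Str.len, PySem.Int.toList_toStr]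
  have hne : PySem.Int.toChars n ≠ [] := by
    rw [PySem.Int.toChars]
    split
    · simp
    · rw [Nat.toDigits, toDigitsCore_eq_dig _ _ _ (Nat.lt_succ_self _), List.append_nil]
      exact dig_ne_nil _
  have := List.length_pos_of_ne_nil hne
  omega

-- ===== VERDICT (by name: the statement is the Claim_ definition above) =====
theorem solution_spec : Claim_equal_solution := by
  intro n _
  unfold Spec_solution
  have halt : solution_alt n
      = altGo n (PySem.List.pyRange (max 0 (n - 9 * PySem.Str.len (PySem.Int.toStr n))) n) := rfl
  have hsol : solution n = solutionGo n (PySem.List.pyRange 0 n) := rfl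
  rw [halt, hsol]
  have hL1 := len_toStr_pos n
  set L : Int := PySem.Str.len (PySem.Int.toStr n) with hLdef
  by_cases hn : n ≤ 0
  · rw [pyRange_one_nil hn, pyRange_one_nil (by omega : n ≤ max 0 (n - 9 * L))]
    rfl
  · set start : Int := max 0 (n - 9 * L) with hstart
    have h0s : 0 ≤ start := le_max_left _ _
    have hsn : start ≤ n := by omega
    have hskip : ∀ i ∈ PySem.List.pyRange 0 start, solutionResult i ≠ n := by
      intro i hi
      obtain ⟨hi0, his⟩ := PySem.List.mem_pyRange_one.mp hi
      have histart : i < n - 9 * L := by omega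
      rw [solutionResult_eq i hi0]
      have hLn : L = ((dig n.toNat).length : Int) := by
        rw [hLdef]
        simp only [PySem.Str.len, PySem.Int.toList_toStr, toChars_eq_dig n (by omega : (0:Int) ≤ n)]
      have hmono : (dig i.toNat).length ≤ (dig n.toNat).length :=
        dig_len_mono n.toNat i.toNat (by omega)
      have hbound : sdig i.toNat ≤ 9 * (dig i.toNat).length := sdig_le i.toNat
      have h1 : (sdig i.toNat : Int) ≤ 9 * ((dig i.toNat).length : Int) := by exact_mod_cast hbound
      have h2 : ((dig i.toNat).length : Int) ≤ ((dig n.toNat).length : Int) := by exact_mod_cast hmono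
      omega
    rw [PySem.List.pyRange_one_append 0 start n h0s hsn,
        solutionGo_append n _ _ hskip,
        go_agree n _ (fun i hi => le_trans h0s (PySem.List.mem_pyRange_one.mp hi).1)]
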